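-- pv_equiv track=rewrite | github.com/VivaRado/Advent | _/VRD_Typography_Library/Lib/similarity_extractor/simex_tools.py | unique_groups
-- ===== SOURCE A (Python) =====
-- import collections
--
-- def unique_groups(mils):
-- 	#
-- 	seen_values = []
-- 	#
-- 	unique_mils = collections.OrderedDict()
-- 	#
-- 	for key, vals in mils.items():
-- 		#
-- 		for x, v in vals.items():
-- 			#
-- 			if x not in seen_values:
-- 				#
-- 				if len(vals) > 1:
-- 					#
-- 					unique_mils[key] = vals
-- 					#
-- 				#
-- 				seen_values.append(x)
-- 				#
-- 			#
-- 	#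
-- 	return unique_mils
-- ===== SOURCE B (Python) =====
-- import collections
--
-- def unique_groups(mils):
--     # pass 1: index each inner key by the position of the first group containing it
--     first_owner = {}
--     for i, (key, vals) in enumerate(mils.items()):
--         for x in vals:
--             first_owner.setdefault(x, i)
--     owners = set(first_owner.values())
--     # pass 2: keep, in order, the groups of size > 1 that own some first-seen inner key
--     unique_mils = collections.OrderedDict()
--     for i, (key, vals) in enumerate(mils.items()):
--         if len(vals) > 1 and i in owners:
--             unique_mils[key] = vals
--     return unique_mils
-- ===== Notes on version B (the rewrite author's own statement) =====
-- stated objective: alternative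
-- what changed: Replaces A's single loop threading a growing seen-list (membership scanned per inner key) with two separate passes: a first pass building a first_owner index via setdefault (inner key -> position of the first group containing it) whose value set identifies the owning groups, then a filter pass over mils that keeps groups with len>1 whose position owns some first-seen key.
import Mathlib
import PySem

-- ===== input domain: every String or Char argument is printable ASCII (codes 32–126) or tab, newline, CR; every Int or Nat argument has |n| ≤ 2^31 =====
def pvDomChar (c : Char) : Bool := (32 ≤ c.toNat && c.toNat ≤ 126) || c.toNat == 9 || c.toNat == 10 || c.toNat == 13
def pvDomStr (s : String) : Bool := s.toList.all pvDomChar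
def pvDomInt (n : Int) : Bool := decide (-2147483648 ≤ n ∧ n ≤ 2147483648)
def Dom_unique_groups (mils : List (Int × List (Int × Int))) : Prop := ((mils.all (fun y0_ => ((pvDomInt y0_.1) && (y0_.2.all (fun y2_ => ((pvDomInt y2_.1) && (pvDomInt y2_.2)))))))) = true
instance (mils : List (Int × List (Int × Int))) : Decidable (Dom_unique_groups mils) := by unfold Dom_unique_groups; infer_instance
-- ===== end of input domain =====

-- B rebuilds the same OrderedDict in two passes (a first_owner index built with setdefault, then a filter
-- over mils) instead of A's single loop threading a growing seen-list; objective: alternative algorithm.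


-- ===== PORT A =====
-- for key, vals in mils.items(): for x, v in vals.items(): if x not in seen: (if len(vals)>1: um[key]=vals); seen.append(x)
def unique_groups (mils : List (Int × List (Int × Int))) : List (Int × List (Int × Int)) :=
  (mils.foldl
    (fun (st : List Int × PySem.Dict Int (List (Int × Int))) kv =>
      kv.2.foldl
        (fun st2 xv =>
          if st2.1.contains xv.1 then st2
          else (st2.1 ++ [xv.1],
            if 1 < kv.2.length then st2.2.insert kv.1 kv.2 else st2.2))
        st)
    ([], PySem.Dict.empty)).2.items

-- ===== PORT B =====
-- pass 1 of Source B: first_owner.setdefault(x, i) over enumerate(mils.items())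
def pvFirstOwnerDict (mils : List (Int × List (Int × Int))) : PySem.Dict Int Int :=
  (PySem.List.enumerate mils).foldl
    (fun fo ikv => ikv.2.2.foldl (fun fo2 xv => fo2.setdefault xv.1 ikv.1) fo)
    PySem.Dict.empty

-- owners = set(first_owner.values())
def pvOwners (mils : List (Int × List (Int × Int))) : PySem.Set Int :=
  PySem.Set.ofList (pvFirstOwnerDict mils).values

-- pass 2 of Source B: keep (key, vals) when len(vals) > 1 and i in owners
def unique_groups_alt (mils : List (Int × List (Int × Int))) : List (Int × List (Int × Int)) :=
  ((PySem.List.enumerate mils).foldl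
    (fun (um : PySem.Dict Int (List (Int × Int))) ikv =>
      if decide (1 < ikv.2.2.length) && (pvOwners mils).contains ikv.1
      then um.insert ikv.2.1 ikv.2.2 else um)
    PySem.Dict.empty).items

-- ===== PRECONDITION & SPEC =====
def Spec_unique_groups (mils : List (Int × List (Int × Int))) (out : List (Int × List (Int × Int))) : Prop := out = unique_groups_alt mils
instance (mils : List (Int × List (Int × Int))) (out : List (Int × List (Int × Int))) : Decidable (Spec_unique_groups mils out) := by unfold Spec_unique_groups; infer_instance

-- ===== CLAIM (what is proved, stated in full; the proofs are below) =====
def Claim_equal_unique_groups : Prop := ∀ (mils : List (Int × List (Int × Int))), Dom_unique_groups mils → Spec_unique_groups mils (unique_groups mils)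

-- ===== LEMMAS AND PROOFS =====

-- inner keys of one group
def pvGKeys (kv : Int × List (Int × Int)) : List Int := kv.2.map Prod.fst

-- common reference fold: thread the set S of inner keys seen so far; insert a group iff it is
-- big and contributes a fresh inner key
def pvSpecD : List Int → List (Int × List (Int × Int)) → PySem.Dict Int (List (Int × Int)) →
    PySem.Dict Int (List (Int × Int))
  | _, [], d => d
  | S, kv :: t, d =>
      pvSpecD (PySem.Set.update S (pvGKeys kv)) t
        (if 1 < kv.2.length ∧ ∃ x ∈ pvGKeys kv, x ∉ S then d.insert kv.1 kv.2 else d)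

-- index of the first group (in an enumerated suffix) whose inner keys contain x
def pvFirstOwner? : List (Int × (Int × List (Int × Int))) → Int → Option Int
  | [], _ => none
  | ikv :: t, x => if x ∈ pvGKeys ikv.2 then some ikv.1 else pvFirstOwner? t x

-- ---- A side ----

theorem pvA_inner (l : List (Int × Int)) (k : Int) (vals : List (Int × Int)) :
    ∀ (seen : List Int) (d : PySem.Dict Int (List (Int × Int))),
    l.foldl
      (fun st2 xv =>
        if st2.1.contains xv.1 then st2
        else (st2.1 ++ [xv.1], if 1 < vals.length then st2.2.insert k vals else st2.2))
      (seen, d)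
    = (PySem.Set.update seen (l.map Prod.fst),
       if 1 < vals.length ∧ ∃ x ∈ l.map Prod.fst, x ∉ seen then d.insert k vals else d) := by
  induction l with
  | nil => intro seen d; simp [PySem.Set.update]
  | cons hd t ih =>
    intro seen d
    simp only [List.foldl_cons, List.map_cons]
    by_cases hx : hd.1 ∈ seen
    · have hc : seen.contains hd.1 = true := by simpa using hx
      rw [hc, if_pos rfl, ih, PySem.Set.update_cons, PySem.Set.add_of_mem hx]
      have hiff : (1 < vals.length ∧ ∃ x ∈ t.map Prod.fst, x ∉ seen) ↔
          (1 < vals.length ∧ ∃ x ∈ hd.1 :: t.map Prod.fst, x ∉ seen) := by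
        constructor
        · rintro ⟨h1, x, hx1, hx2⟩; exact ⟨h1, x, List.mem_cons_of_mem _ hx1, hx2⟩
        · rintro ⟨h1, x, hx1, hx2⟩
          rcases List.mem_cons.mp hx1 with rfl | hm
          · exact absurd hx hx2
          · exact ⟨h1, x, hm, hx2⟩
      exact congrArg₂ Prod.mk rfl (if_congr hiff rfl rfl)
    · have hc : seen.contains hd.1 = false := by simpa using hx
      rw [hc, if_neg (by simp), ih, PySem.Set.update_cons, PySem.Set.add_of_not_mem hx]
      by_cases hlen : 1 < vals.length
      · rw [if_pos hlen]
        congr 1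
        rw [PySem.Dict.insert_insert_self, ite_self,
            if_pos ⟨hlen, hd.1, by simp, hx⟩]
      · rw [if_neg hlen]
        congr 1
        rw [if_neg (fun h => hlen h.1), if_neg (fun h => hlen h.1)]

theorem pvA_outer (mils : List (Int × List (Int × Int))) :
    ∀ (seen : List Int) (d : PySem.Dict Int (List (Int × Int))),
    (mils.foldl
      (fun (st : List Int × PySem.Dict Int (List (Int × Int))) kv =>
        kv.2.foldl
          (fun st2 xv =>
            if st2.1.contains xv.1 then st2
            else (st2.1 ++ [xv.1], if 1 < kv.2.length then st2.2.insert kv.1 kv.2 else st2.2))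
          st)
      (seen, d)).2 = pvSpecD seen mils d := by
  induction mils with
  | nil => intro seen d; simp [pvSpecD]
  | cons kv t ih =>
    intro seen d
    simp only [List.foldl_cons, pvSpecD]
    rw [pvA_inner kv.2 kv.1 kv.2 seen d, ih]
    rfl

-- ---- B side ----

theorem pvFO_inner (l : List (Int × Int)) (i : Int) :
    ∀ (fo : PySem.Dict Int Int) (x : Int),
    (l.foldl (fun fo2 xv => fo2.setdefault xv.1 i) fo).get? x
      = (fo.get? x).or (if x ∈ l.map Prod.fst then some i else none) := by
  induction l with
  | nil => intro fo x; simp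
  | cons hd t ih =>
    intro fo x
    simp only [List.foldl_cons, ih, List.map_cons]
    have hsd : (fo.setdefault hd.1 i).get? x
        = (fo.get? x).or (if x = hd.1 then some i else none) := by
      by_cases hc : fo.contains hd.1
      · rw [PySem.Dict.setdefault_of_contains fo i hc]
        by_cases hxy : x = hd.1
        · subst hxy
          rw [PySem.Dict.contains_eq_isSome_get?] at hc
          obtain ⟨v, hv⟩ := Option.isSome_iff_exists.mp hc
          simp [hv]
        · simp [hxy]
      · rw [PySem.Dict.setdefault_of_not_contains fo i (by simpa using hc)]
        by_cases hxy : x = hd.1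
        · subst hxy
          rw [PySem.Dict.contains_eq_isSome_get?] at hc
          simp only [Bool.not_eq_true, Option.isSome_eq_false_iff,
            Option.isNone_iff_eq_none] at hc
          simp [PySem.Dict.get?_insert_self, hc]
        · simp [PySem.Dict.get?_insert_of_ne _ _ hxy, hxy]
    rw [hsd, Option.or_assoc]
    congr 1
    by_cases hxy : x = hd.1
    · subst hxy; simp
    · have hbc : (x ∈ List.map Prod.fst t) ↔ (x ∈ hd.1 :: List.map Prod.fst t) := by
        constructor
        · exact fun h => List.mem_cons_of_mem _ h
        · intro h
          rcases List.mem_cons.mp h with h' | h'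
          · exact absurd h' hxy
          · exact h'
      rw [if_neg hxy, Option.none_or]
      exact if_congr hbc rfl rfl

theorem pvFO_fold (el : List (Int × (Int × List (Int × Int)))) :
    ∀ (fo : PySem.Dict Int Int) (x : Int),
    (el.foldl (fun fo ikv => ikv.2.2.foldl (fun fo2 xv => fo2.setdefault xv.1 ikv.1) fo) fo).get? x
      = (fo.get? x).or (pvFirstOwner? el x) := by
  induction el with
  | nil => intro fo x; simp [pvFirstOwner?]
  | cons ikv t ih =>
    intro fo x
    simp only [List.foldl_cons, ih, pvFO_inner, pvFirstOwner?, Option.or_assoc, pvGKeys]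
    congr 1
    by_cases hm : x ∈ ikv.2.2.map Prod.fst
    · simp [hm]
    · simp [hm]

theorem pvFO_nodup (el : List (Int × (Int × List (Int × Int)))) :
    ∀ (fo : PySem.Dict Int Int), fo.keys.Nodup →
    (el.foldl (fun fo ikv => ikv.2.2.foldl (fun fo2 xv => fo2.setdefault xv.1 ikv.1) fo) fo).keys.Nodup := by
  induction el with
  | nil => intro fo h; simpa
  | cons ikv t ih =>
    intro fo h
    simp only [List.foldl_cons]
    apply ih
    clear ih
    induction ikv.2.2 generalizing fo with
    | nil => simpa
    | cons hd t2 ih2 =>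
      simp only [List.foldl_cons]
      apply ih2
      by_cases hc : fo.contains hd.1
      · rwa [PySem.Dict.setdefault_of_contains fo _ hc]
      · rw [PySem.Dict.setdefault_of_not_contains fo _ (by simpa using hc)]
        exact PySem.Dict.nodup_keys_insert fo _ _ h

theorem pvOwners_iff (mils : List (Int × List (Int × Int))) (i : Int) :
    (pvOwners mils).contains i = true ↔
      ∃ x, pvFirstOwner? (PySem.List.enumerate mils) x = some i := by
  have hnd : (pvFirstOwnerDict mils).keys.Nodup := by
    apply pvFO_nodup
    exact PySem.Dict.nodup_keys_empty
  rw [PySem.Set.contains_iff, pvOwners, PySem.Set.mem_ofList]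
  unfold PySem.Dict.values
  rw [List.mem_map]
  constructor
  · rintro ⟨p, hp, rfl⟩
    refine ⟨p.1, ?_⟩
    have h := (PySem.Dict.get?_eq_some_iff_mem_items (pvFirstOwnerDict mils) p.1 p.2 hnd).mpr hp
    rw [pvFirstOwnerDict, pvFO_fold] at h
    simpa using h
  · rintro ⟨x, hx⟩
    have h : (pvFirstOwnerDict mils).get? x = some i := by
      rw [pvFirstOwnerDict, pvFO_fold]; simpa using hx
    exact ⟨(x, i), (PySem.Dict.get?_eq_some_iff_mem_items _ _ _ hnd).mp h, rfl⟩

theorem pvFO_ge (t : List (Int × List (Int × Int))) :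
    ∀ (m : Int) (x i : Int), pvFirstOwner? (PySem.List.enumerate t m) x = some i → m ≤ i := by
  induction t with
  | nil => intro m x i h; simp [PySem.List.enumerate_nil, pvFirstOwner?] at h
  | cons kv t ih =>
    intro m x i h
    rw [PySem.List.enumerate_cons, pvFirstOwner?] at h
    by_cases hx : x ∈ pvGKeys kv
    · rw [if_pos hx] at h
      injection h with h
      omega
    · rw [if_neg hx] at h
      have := ih (m + 1) x i h
      omega

theorem pvB_outer (mils : List (Int × List (Int × Int))) (l : List (Int × List (Int × Int))) :
    ∀ (n : Int) (S : List Int) (d : PySem.Dict Int (List (Int × Int))),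
    (∀ x : Int, x ∉ S →
      pvFirstOwner? (PySem.List.enumerate mils) x = pvFirstOwner? (PySem.List.enumerate l n) x) →
    (∀ x ∈ S, ∀ i : Int, pvFirstOwner? (PySem.List.enumerate mils) x = some i → i < n) →
    (PySem.List.enumerate l n).foldl
      (fun (um : PySem.Dict Int (List (Int × Int))) ikv =>
        if decide (1 < ikv.2.2.length) && (pvOwners mils).contains ikv.1
        then um.insert ikv.2.1 ikv.2.2 else um)
      d = pvSpecD S l d := by
  induction l with
  | nil => intro n S d _ _; simp [PySem.List.enumerate_nil, pvSpecD]
  | cons kv t ih =>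
    intro n S d h1 h2
    rw [PySem.List.enumerate_cons, List.foldl_cons, pvSpecD]
    have hcond : ((pvOwners mils).contains n = true) ↔ ∃ x ∈ pvGKeys kv, x ∉ S := by
      rw [pvOwners_iff]
      constructor
      · rintro ⟨x, hx⟩
        by_cases hS : x ∈ S
        · exact absurd (h2 x hS n hx) (by omega)
        · rw [h1 x hS, PySem.List.enumerate_cons, pvFirstOwner?] at hx
          by_cases hk : x ∈ pvGKeys kv
          · exact ⟨x, hk, hS⟩
          · rw [if_neg hk] at hx
            exact absurd (pvFO_ge t (n + 1) x n hx) (by omega)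
      · rintro ⟨x, hk, hS⟩
        refine ⟨x, ?_⟩
        rw [h1 x hS, PySem.List.enumerate_cons, pvFirstOwner?, if_pos hk]
    have hstep : (if decide (1 < kv.2.length) && (pvOwners mils).contains n
        then d.insert kv.1 kv.2 else d)
        = (if 1 < kv.2.length ∧ ∃ x ∈ pvGKeys kv, x ∉ S then d.insert kv.1 kv.2 else d) := by
      by_cases hP : 1 < kv.2.length ∧ ∃ x ∈ pvGKeys kv, x ∉ S
      · have hb : (decide (1 < kv.2.length) && (pvOwners mils).contains n) = true := by
          rw [hcond.mpr hP.2, decide_eq_true hP.1]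
          rfl
        rw [if_pos hb, if_pos hP]
      · rw [if_neg hP, if_neg ?_]
        simp only [Bool.and_eq_true, decide_eq_true_eq]
        rintro ⟨ha, hb⟩
        exact hP ⟨ha, hcond.mp hb⟩
    rw [hstep]
    apply ih
    · intro x hx
      have hxS : x ∉ S := fun h => hx (by simp [PySem.Set.mem_update, h])
      have hxk : x ∉ pvGKeys kv := fun h => hx (by simp [PySem.Set.mem_update, h])
      rw [h1 x hxS, PySem.List.enumerate_cons, pvFirstOwner?, if_neg hxk]
    · intro x hx i hi
      rcases (PySem.Set.mem_update S (pvGKeys kv) x).mp hx with hS | hk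
      · have := h2 x hS i hi; omega
      · by_cases hS : x ∈ S
        · have := h2 x hS i hi; omega
        · rw [h1 x hS, PySem.List.enumerate_cons, pvFirstOwner?, if_pos hk] at hi
          injection hi with hi
          omega

-- ===== VERDICT (by name: the statement is the Claim_ definition above) =====
theorem unique_groups_spec : Claim_equal_unique_groups := by
  intro mils _
  show unique_groups mils = unique_groups_alt mils
  rw [unique_groups, unique_groups_alt, pvA_outer,
      pvB_outer mils mils 0 [] PySem.Dict.empty (fun _ _ => rfl) (by simp)]
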